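-- pv_equiv track=rewrite | github.com/Petotem/SARS_CoV_2_Mutations | primer_finder.py | match_non_prob
-- ===== SOURCE A (Python) =====
-- def match_non_prob(seqA, seqB):
--     counter = 0
--     mismatch = 0
--     for a, b in zip(seqA, seqB):
--         if counter < 5:
--             if a == b:
--                 counter += 1
--                 continue
--             else:
--                 return False, 1000
--         else:
--             if a != b:
--                 mismatch += 1
--                 if mismatch > 3:
--                     return False, 600
--     return True, mismatch
-- ===== SOURCE B (Python) =====
-- def match_non_prob(seqA, seqB):
--     # Characterise the verdict by the mismatch positions alone:
--     # a mismatch among the first 5 aligned pairs -> (False, 1000);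
--     # more than 3 mismatches afterwards -> (False, 600); else (True, count).
--     bad = [i for i, (a, b) in enumerate(zip(seqA, seqB)) if a != b]
--     if bad and bad[0] < 5:
--         return False, 1000
--     if len(bad) > 3:
--         return False, 600
--     return True, len(bad)
-- ===== Notes on version B (the rewrite author's own statement) =====
-- stated objective: simpler
-- what changed: Replaces A's stateful counter/threshold loop with a declarative characterisation: collect all mismatch positions once, then derive the verdict arithmetically from the first mismatch position and the mismatch count.
import Mathlib
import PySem

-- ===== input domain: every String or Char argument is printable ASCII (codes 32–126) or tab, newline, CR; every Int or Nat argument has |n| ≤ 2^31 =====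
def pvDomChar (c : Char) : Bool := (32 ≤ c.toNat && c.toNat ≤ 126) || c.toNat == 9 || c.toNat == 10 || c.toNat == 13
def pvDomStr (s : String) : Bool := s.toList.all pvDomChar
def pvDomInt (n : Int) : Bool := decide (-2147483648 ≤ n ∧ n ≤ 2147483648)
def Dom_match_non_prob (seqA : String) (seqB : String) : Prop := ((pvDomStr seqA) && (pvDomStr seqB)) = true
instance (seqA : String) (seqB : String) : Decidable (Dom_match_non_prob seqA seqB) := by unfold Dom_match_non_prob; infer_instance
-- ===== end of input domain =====

-- B replaces A's stateful counter/threshold loop by a declarative characterisation: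
-- collect the mismatch positions once, then derive the verdict arithmetically (simpler; same cost).

-- ===== PORT A =====
-- A's single loop over zip(seqA,seqB) with counter/mismatch state.
def matchLoopA : List (Char × Char) → Nat → Int → Bool × Int
  | [], _, mismatch => (true, mismatch)
  | (a, b) :: rest, counter, mismatch =>
    if counter < 5 then
      if a == b then matchLoopA rest (counter + 1) mismatch
      else (false, 1000)
    else
      if a != b then
        if mismatch + 1 > 3 then (false, 600)
        else matchLoopA rest counter (mismatch + 1)
      else matchLoopA rest counter mismatch

def match_non_prob (seqA : String) (seqB : String) : Bool × Int :=
  matchLoopA (seqA.toList.zip seqB.toList) 0 0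

-- ===== PORT B =====
-- [i for i, (a, b) in enumerate(zip(seqA, seqB)) if a != b]
def badList : List (Char × Char) → Nat → List Nat
  | [], _ => []
  | (a, b) :: rest, i =>
    if a != b then i :: badList rest (i + 1) else badList rest (i + 1)

def match_non_prob_alt (seqA : String) (seqB : String) : Bool × Int :=
  let bad := badList (seqA.toList.zip seqB.toList) 0
  if (match bad.head? with | some i => decide (i < 5) | none => false) then (false, 1000)
  else if (bad.length : Int) > 3 then (false, 600)
  else (true, (bad.length : Int))

-- ===== PRECONDITION & SPEC =====
def Spec_match_non_prob (seqA : String) (seqB : String) (out : Bool × Int) : Prop := out = match_non_prob_alt seqA seqB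
instance (seqA : String) (seqB : String) (out : Bool × Int) : Decidable (Spec_match_non_prob seqA seqB out) := by unfold Spec_match_non_prob; infer_instance

-- ===== CLAIM (what is proved, stated in full; the proofs are below) =====
def Claim_equal_match_non_prob : Prop := ∀ (seqA : String) (seqB : String), Dom_match_non_prob seqA seqB → Spec_match_non_prob seqA seqB (match_non_prob seqA seqB)

-- ===== LEMMAS AND PROOFS =====

-- The verdict B computes from a mismatch-position list, with accumulated mismatch count m.
def altCore (bad : List Nat) (m : Int) : Bool × Int :=
  if (match bad.head? with | some i => decide (i < 5) | none => false) then (false, 1000)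
  else if m + (bad.length : Int) > 3 then (false, 600)
  else (true, m + (bad.length : Int))

theorem badList_mem_ge (l : List (Char × Char)) (i : Nat) :
    ∀ x ∈ badList l i, i ≤ x := by
  induction l generalizing i with
  | nil => simp [badList]
  | cons p rest ih =>
    obtain ⟨a, b⟩ := p
    intro x hx
    simp only [badList] at hx
    split_ifs at hx with h
    · rcases List.mem_cons.mp hx with rfl | hx
      · exact le_refl _
      · exact Nat.le_of_succ_le (ih (i + 1) x hx)
    · exact Nat.le_of_succ_le (ih (i + 1) x hx)

-- Once the counter has reached 5, A's loop is governed solely by the number of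
-- remaining mismatches; the head-< 5 test of altCore is vacuous for offsets ≥ 5.
theorem matchLoopA_five (l : List (Char × Char)) (i : Nat) (m : Int)
    (hi : 5 ≤ i) (hm0 : 0 ≤ m) (hm3 : m ≤ 3) :
    matchLoopA l 5 m = altCore (badList l i) m := by
  induction l generalizing i m with
  | nil => simp [matchLoopA, altCore, badList]; omega
  | cons p rest ih =>
    obtain ⟨a, b⟩ := p
    have hL : matchLoopA ((a, b) :: rest) 5 m =
        if (a != b) = true then (if m + 1 > 3 then (false, 600) else matchLoopA rest 5 (m + 1))
        else matchLoopA rest 5 m := by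
      simp [matchLoopA]
    by_cases hab : a == b
    · rw [hL, if_neg (by simp [bne, hab]), ih (i + 1) m (by omega) hm0 hm3]
      simp [badList, bne, hab]
    · have hbad : badList ((a, b) :: rest) i = i :: badList rest (i + 1) := by
        simp [badList, bne, hab]
      have htail : (match (badList rest (i + 1)).head? with
          | some j => decide (j < 5) | none => false) = false := by
        cases hhd : (badList rest (i + 1)).head? with
        | none => rfl
        | some j =>
          have := badList_mem_ge rest (i + 1) j (List.mem_of_mem_head? hhd)
          simp; omega
      rw [hL, if_pos (by simp [bne, hab])]
      by_cases h4 : m + 1 > 3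
      · rw [if_pos h4]
        simp only [altCore, hbad, List.head?_cons, List.length_cons]
        rw [if_neg (by simp; omega), if_pos (by push_cast; omega)]
      · rw [if_neg h4, ih (i + 1) (m + 1) (by omega) (by omega) (by omega)]
        simp only [altCore, htail, hbad, List.head?_cons, List.length_cons]
        have he : m + 1 + ((badList rest (i + 1)).length : Int)
            = m + (((badList rest (i + 1)).length : Int) + 1) := by ring
        push_cast
        rw [he]
        have hi5 : ¬ (decide (i < 5) = true) := by simp; omega
        rw [if_neg hi5]

-- Main invariant: with counter c ≤ 5, A's loop demands a match on each of the next
-- 5 - c pairs (mismatch → 1000) and then counts mismatches.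
theorem matchLoopA_lo (l : List (Char × Char)) (c : Nat) (m : Int)
    (hc : c ≤ 5) (hm0 : 0 ≤ m) (hm3 : m ≤ 3) :
    matchLoopA l c m = altCore (badList l c) m := by
  induction l generalizing c with
  | nil => simp [matchLoopA, altCore, badList]; omega
  | cons p rest ih =>
    obtain ⟨a, b⟩ := p
    by_cases h5 : c < 5
    · by_cases hab : a == b
      · simp only [matchLoopA, badList, bne, hab, if_pos h5]
        simpa using ih (c + 1) (by omega)
      · simp only [matchLoopA, badList, bne, hab, if_pos h5, altCore]
        simp [h5]
    · have hc5 : c = 5 := by omega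
      subst hc5
      exact matchLoopA_five ((a, b) :: rest) 5 m (by omega) hm0 hm3

theorem altCore_zero (bad : List Nat) :
    altCore bad 0 = (if (match bad.head? with | some i => decide (i < 5) | none => false) then ((false : Bool), (1000 : Int))
      else if (bad.length : Int) > 3 then (false, 600) else (true, (bad.length : Int))) := by
  simp [altCore]

-- ===== VERDICT (by name: the statement is the Claim_ definition above) =====
theorem match_non_prob_spec : Claim_equal_match_non_prob := by
  intro seqA seqB _
  unfold Spec_match_non_prob match_non_prob match_non_prob_alt
  rw [matchLoopA_lo (seqA.toList.zip seqB.toList) 0 0 (by omega) (by omega) (by omega),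
    altCore_zero]
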